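-- pv_equiv track=rewrite | github.com/zyond26/Practise_ICPC | Test_máy/Pro_D.py | find_best_k
-- ===== SOURCE A (Python) =====
-- def find_best_k(s):
--     n = len(s)
--
--     # Tính toán tiền tố (prefix sums)
--     prefix_R = [0] * (n + 1)
--     prefix_P = [0] * (n + 1)
--     prefix_S = [0] * (n + 1)
--
--     for i, char in enumerate(s):
--         prefix_R[i+1] = prefix_R[i] + (char == 'R')
--         prefix_P[i+1] = prefix_P[i] + (char == 'P')
--         prefix_S[i+1] = prefix_S[i] + (char == 'S')
--
--     max_wins = 0
--     best_k = 1
--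
--     # Kiểm tra từng k từ 2 đến n
--     for k in range(2, n + 1):
--         wins = 0
--         for i in range(0, n, k):
--             end = min(i + k, n)
--             rock_count = prefix_R[end] - prefix_R[i]
--             paper_count = prefix_P[end] - prefix_P[i]
--             scissor_count = prefix_S[end] - prefix_S[i]
--             wins += max(rock_count, paper_count, scissor_count)
--
--         if wins > max_wins:
--             max_wins = wins
--             best_k = k
--         elif wins == max_wins:
--             best_k = max(best_k, k)
--
--     return best_k
-- ===== SOURCE B (Python) =====
-- def find_best_k(s):
--     n = len(s)
--     max_wins = 0
--     best_k = 1
--     for k in range(2, n + 1):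
--         # no prefix sums: consume the string block by block, recounting each block
--         wins = 0
--         rest = s
--         while rest:
--             block, rest = rest[:k], rest[k:]
--             wins += max(block.count('R'), block.count('P'), block.count('S'))
--         if wins > max_wins:
--             max_wins = wins
--             best_k = k
--         elif wins == max_wins:
--             best_k = max(best_k, k)
--     return best_k
-- ===== Notes on version B (the rewrite author's own statement) =====
-- stated objective: simpler
-- what changed: Drops the three prefix-sum arrays entirely: for each k, B consumes the string block by block with a while loop (rest[:k]/rest[k:]) and recounts each block's R/P/S directly, summing the per-block maxima.
import Mathlib
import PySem

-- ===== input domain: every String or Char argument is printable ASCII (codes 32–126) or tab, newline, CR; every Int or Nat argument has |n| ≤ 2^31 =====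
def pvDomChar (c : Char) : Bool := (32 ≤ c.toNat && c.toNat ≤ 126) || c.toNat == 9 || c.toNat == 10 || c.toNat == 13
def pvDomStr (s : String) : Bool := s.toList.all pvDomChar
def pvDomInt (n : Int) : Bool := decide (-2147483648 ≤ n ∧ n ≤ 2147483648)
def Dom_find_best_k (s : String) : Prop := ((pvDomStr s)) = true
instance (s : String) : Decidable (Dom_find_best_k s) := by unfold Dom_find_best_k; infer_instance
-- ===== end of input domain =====

-- B drops A's three prefix-sum arrays: for each k it consumes the string block by
-- block (rest[:k] / rest[k:]), recounting each block's R/P/S directly; same value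
-- on every string (objective: simpler, not faster).

-- ===== PORT A =====
def find_best_k (s : String) : Int :=
  let l := s.toList
  let n : Int := (l.length : Int)
  let pre := l.zipIdx.foldl
    (fun (st : List Int × List Int × List Int) (ci : Char × Nat) =>
      (st.1.set (ci.2 + 1) (st.1.getD ci.2 0 + (if ci.1 = 'R' then 1 else 0)),
       st.2.1.set (ci.2 + 1) (st.2.1.getD ci.2 0 + (if ci.1 = 'P' then 1 else 0)),
       st.2.2.set (ci.2 + 1) (st.2.2.getD ci.2 0 + (if ci.1 = 'S' then 1 else 0))))
    (List.replicate (l.length + 1) (0 : Int), List.replicate (l.length + 1) (0 : Int),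
     List.replicate (l.length + 1) (0 : Int))
  let res := (PySem.List.pyRange 2 (n + 1) 1).foldl
    (fun (st : Int × Int) (k : Int) =>
      let wins := (PySem.List.pyRange 0 n k).foldl
        (fun (w : Int) (i : Int) =>
          let e := min (i + k) n
          let rc := PySem.List.pyGetD pre.1 e 0 - PySem.List.pyGetD pre.1 i 0
          let pc := PySem.List.pyGetD pre.2.1 e 0 - PySem.List.pyGetD pre.2.1 i 0
          let sc := PySem.List.pyGetD pre.2.2 e 0 - PySem.List.pyGetD pre.2.2 i 0
          w + max (max rc pc) sc) 0
      if st.1 < wins then (wins, k)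
      else if wins = st.1 then (st.1, max st.2 k) else st)
    (0, 1)
  res.2

-- ===== PORT B =====
-- the while loop 'while rest: block, rest = rest[:k], rest[k:]; wins += max(...)'
-- (block size is m+1: called with m = k.toNat - 1, so that the recursion is
-- well-founded for every m; single-char str.count is List.count on the chars)
def pvWhileWins (m : Nat) (wins : Int) (l : List Char) : Int :=
  if l = [] then wins
  else pvWhileWins m
    (wins + max (max ((l.take (m + 1)).count 'R' : Int) ((l.take (m + 1)).count 'P' : Int))
                ((l.take (m + 1)).count 'S' : Int))
    (l.drop (m + 1))
termination_by l.length
decreasing_by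
  rename_i h
  have : l.length ≠ 0 := fun h0 => h (List.eq_nil_of_length_eq_zero h0)
  simp only [List.length_drop]; omega

def find_best_k_alt (s : String) : Int :=
  let l := s.toList
  let n : Int := (l.length : Int)
  let res := (PySem.List.pyRange 2 (n + 1) 1).foldl
    (fun (st : Int × Int) (k : Int) =>
      let wins := pvWhileWins (k.toNat - 1) 0 l
      if st.1 < wins then (wins, k)
      else if wins = st.1 then (st.1, max st.2 k) else st)
    (0, 1)
  res.2

-- ===== PRECONDITION & SPEC =====
def Spec_find_best_k (s : String) (out : Int) : Prop := out = find_best_k_alt s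
instance (s : String) (out : Int) : Decidable (Spec_find_best_k s out) := by unfold Spec_find_best_k; infer_instance

-- ===== CLAIM (what is proved, stated in full; the proofs are below) =====
def Claim_equal_find_best_k : Prop := ∀ (s : String), Dom_find_best_k s → Spec_find_best_k s (find_best_k s)

-- ===== LEMMAS AND PROOFS =====

-- cumulative counts of the three relevant characters in a prefix
def pvCnt (t : List Char) : Int × Int × Int :=
  ((t.count 'R' : Int), (t.count 'P' : Int), (t.count 'S' : Int))

-- common value both inner loops compute for a given k: per-block maxima as
-- differences of consecutive boundary prefix counts
def pvW (l : List Char) (k : Int) : Int :=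
  ((List.range (((l.length : Int) + k - 1) / k).toNat).map
    (fun (j : Nat) =>
      let a := pvCnt (l.take (min (k * (j : Int)).toNat l.length))
      let b := pvCnt (l.take (min (k * ((j : Int) + 1)).toNat l.length))
      max (max (b.1 - a.1) (b.2.1 - a.2.1)) (b.2.2 - a.2.2))).sum

theorem pv_set_map_range {α : Type} (f : Nat → α) (L i : Nat) (v : α) :
    ((List.range L).map f).set i v
      = (List.range L).map (fun j => if j = i then v else f j) := by
  apply List.ext_getElem
  · simp
  · intro j hj hj'
    simp only [List.getElem_set, List.getElem_map, List.getElem_range]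
    by_cases h : j = i
    · simp [h]
    · simp only [if_neg h]
      exact if_neg (fun h' => h h'.symm)

theorem pv_prefGo (c0 : Char) (l : List Char) :
    ∀ (t : List Char) (m : Nat), t = l.drop m →
    ((t.zipIdx m).foldl
        (fun (pr : List Int) (ci : Char × Nat) =>
          pr.set (ci.2 + 1) (pr.getD ci.2 0 + (if ci.1 = c0 then 1 else 0)))
        ((List.range (l.length + 1)).map
          (fun j => if j ≤ m then ((l.take j).count c0 : Int) else 0)))
      = (List.range (l.length + 1)).map (fun j => ((l.take j).count c0 : Int)) := by
  intro t
  induction t with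
  | nil =>
    intro m ht
    have hm : l.length ≤ m := by
      have := congrArg List.length ht
      simp at this; omega
    simp only [List.zipIdx, List.foldl_nil]
    apply List.map_congr_left
    intro j hj
    simp only [List.mem_range] at hj
    rw [if_pos (by omega)]
  | cons ch t' ih =>
    intro m ht
    have hlen := congrArg List.length ht
    simp only [List.length_cons, List.length_drop] at hlen
    have hlt : m < l.length := by omega
    have hch : l[m]? = some ch := by
      rw [← List.head?_drop, ← ht, List.head?_cons]
    have ht' : t' = l.drop (m + 1) := by
      rw [← List.tail_drop, ← ht, List.tail_cons]
    rw [List.zipIdx_cons, List.foldl_cons]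
    have hstep :
        (((List.range (l.length + 1)).map
            (fun j => if j ≤ m then ((l.take j).count c0 : Int) else 0)).set (m + 1)
          (((List.range (l.length + 1)).map
            (fun j => if j ≤ m then ((l.take j).count c0 : Int) else 0)).getD m 0
            + (if ch = c0 then 1 else 0)))
        = (List.range (l.length + 1)).map
            (fun j => if j ≤ m + 1 then ((l.take j).count c0 : Int) else 0) := by
      rw [PySem.List.getD_map_range _ _ _ _ (by omega), if_pos (le_refl m), pv_set_map_range]
      apply List.map_congr_left
      intro j hj
      simp only [List.mem_range] at hj
      by_cases hje : j = m + 1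
      · subst hje
        rw [if_pos rfl, if_pos (le_refl _)]
        rw [List.take_add_one, hch]
        simp only [Option.toList_some, List.count_append, List.count_singleton]
        push_cast
        by_cases hc : ch = c0 <;> simp [hc, beq_iff_eq]
      · rw [if_neg hje]
        by_cases hjm : j ≤ m
        · rw [if_pos hjm, if_pos (by omega)]
        · rw [if_neg hjm, if_neg (by omega)]
    rw [hstep]
    exact ih (m + 1) ht'

theorem pv_prefA (c0 : Char) (l : List Char) :
    (l.zipIdx.foldl
        (fun (pr : List Int) (ci : Char × Nat) =>
          pr.set (ci.2 + 1) (pr.getD ci.2 0 + (if ci.1 = c0 then 1 else 0)))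
        (List.replicate (l.length + 1) (0 : Int)))
      = (List.range (l.length + 1)).map (fun j => ((l.take j).count c0 : Int)) := by
  have hrep : (List.replicate (l.length + 1) (0 : Int))
      = (List.range (l.length + 1)).map
          (fun j => if j ≤ 0 then ((l.take j).count c0 : Int) else 0) := by
    have : ((List.range (l.length + 1)).map
        (fun j => if j ≤ 0 then ((l.take j).count c0 : Int) else 0))
        = (List.range (l.length + 1)).map (fun _ => (0 : Int)) := by
      apply List.map_congr_left
      intro j hj
      by_cases h : j ≤ 0
      · have : j = 0 := by omega
        subst this; simp
      · rw [if_neg h]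
    rw [this, List.map_const', List.length_range]
  rw [hrep]
  exact pv_prefGo c0 l l 0 (by simp)

theorem pv_winsA (l : List Char) (k : Int) (hk : 2 ≤ k)
    (pr pp ps : List Int)
    (hpr : pr = (List.range (l.length + 1)).map (fun j => ((l.take j).count 'R' : Int)))
    (hpp : pp = (List.range (l.length + 1)).map (fun j => ((l.take j).count 'P' : Int)))
    (hps : ps = (List.range (l.length + 1)).map (fun j => ((l.take j).count 'S' : Int))) :
    (PySem.List.pyRange 0 (l.length : Int) k).foldl
        (fun (w : Int) (i : Int) =>
          w + max (max (PySem.List.pyGetD pr (min (i + k) (l.length : Int)) 0 - PySem.List.pyGetD pr i 0)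
                       (PySem.List.pyGetD pp (min (i + k) (l.length : Int)) 0 - PySem.List.pyGetD pp i 0))
                  (PySem.List.pyGetD ps (min (i + k) (l.length : Int)) 0 - PySem.List.pyGetD ps i 0)) 0
      = pvW l k := by
  subst hpr hpp hps
  have hk0 : (0:Int) < k := by omega
  rw [PySem.List.pyRange_of_pos 0 (l.length : Int) hk0]
  have hcnt : (if (0:Int) < (l.length : Int) then (((l.length : Int) - 0 + k - 1) / k).toNat else 0)
      = (((l.length : Int) + k - 1) / k).toNat := by
    by_cases h : (0:Int) < (l.length : Int)
    · rw [if_pos h]; norm_num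
    · rw [if_neg h]
      have hL : (l.length : Int) = 0 := by omega
      rw [hL]
      rw [show (0 : Int) + k - 1 = k - 1 by ring]
      rw [Int.ediv_eq_zero_of_lt (by omega) (by omega)]
      rfl
  rw [hcnt]
  rw [PySem.List.foldl_add]
  rw [List.map_map]
  rw [pvW, zero_add]
  congr 1
  apply List.map_congr_left
  intro j hj
  simp only [List.mem_range] at hj
  have hjk : k * (j : Int) < (l.length : Int) := by
    have h1 : (j : Int) + 1 ≤ ((l.length : Int) + k - 1)/k := by
      generalize hd : ((l.length : Int) + k - 1)/k = d at hj ⊢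
      omega
    rw [Int.le_ediv_iff_mul_le hk0] at h1
    nlinarith
  simp only [Function.comp, zero_add]
  have hi0 : (0:Int) ≤ k * (j:Int) := by positivity
  have he0 : (0:Int) ≤ min (k * (j:Int) + k) (l.length : Int) := le_min (by omega) (by omega)
  rw [PySem.List.pyGetD_of_nonneg _ _ he0, PySem.List.pyGetD_of_nonneg _ _ hi0,
      PySem.List.pyGetD_of_nonneg _ _ he0, PySem.List.pyGetD_of_nonneg _ _ hi0,
      PySem.List.pyGetD_of_nonneg _ _ he0, PySem.List.pyGetD_of_nonneg _ _ hi0]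
  have hlow : (k * (j:Int)).toNat < l.length + 1 := by omega
  have hhigh : (min (k * (j:Int) + k) (l.length : Int)).toNat < l.length + 1 := by omega
  rw [PySem.List.getD_map_range _ _ _ _ hhigh, PySem.List.getD_map_range _ _ _ _ hlow,
      PySem.List.getD_map_range _ _ _ _ hhigh, PySem.List.getD_map_range _ _ _ _ hlow,
      PySem.List.getD_map_range _ _ _ _ hhigh, PySem.List.getD_map_range _ _ _ _ hlow]
  have hmuladd : k * ((j:Int) + 1) = k * (j:Int) + k := by ring
  have ha : min (k * (j:Int)).toNat l.length = (k * (j:Int)).toNat := by omega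
  have hb : min (k * ((j:Int) + 1)).toNat l.length = (min (k * (j:Int) + k) (l.length : Int)).toNat := by
    rw [hmuladd]; omega
  simp only [pvCnt, ha, hb]

-- B-side lemmas: pvW satisfies the chunking recursion

theorem pv_take_min (l : List Char) (a : Nat) : l.take (min a l.length) = l.take a := by
  rcases le_total a l.length with h | h
  · rw [min_eq_left h]
  · rw [min_eq_right h, List.take_length, List.take_of_length_le h]

theorem pv_count_shift (l : List Char) (k' a : Nat) (c : Char) :
    ((l.take (min (k' + a) l.length)).count c : Int)
      = ((l.take k').count c : Int)
        + (((l.drop k').take (min a (l.length - k'))).count c : Int) := by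
  rcases le_total k' l.length with h | h
  · have hmin : min (k' + a) l.length = k' + min a (l.length - k') := by omega
    rw [hmin, List.take_add, List.count_append]
    push_cast; ring
  · have h1 : min (k' + a) l.length = l.length := by omega
    have h2 : l.length - k' = 0 := by omega
    rw [h1, h2, List.take_length, List.take_of_length_le h,
        List.drop_of_length_le h]
    simp

theorem pv_toNat_mul (k : Int) (hk : 0 ≤ k) (j : Nat) :
    (k * (j : Int)).toNat = k.toNat * j := by
  have : k * (j : Int) = ((k.toNat * j : Nat) : Int) := by
    push_cast [Int.toNat_of_nonneg hk]; ring
  rw [this, Int.toNat_natCast]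

theorem pv_pvW_nil (k : Int) (hk : 2 ≤ k) : pvW [] k = 0 := by
  unfold pvW
  rw [List.length_nil]
  have : (((0:Nat) : Int) + k - 1) / k = 0 := by
    rw [show ((0:Nat):Int) + k - 1 = k - 1 by push_cast; ring]
    exact Int.ediv_eq_zero_of_lt (by omega) (by omega)
  rw [this]
  simp

theorem pv_pvW_step (l : List Char) (k : Int) (hk : 2 ≤ k) (hl : l ≠ []) :
    pvW l k
      = max (max ((l.take k.toNat).count 'R' : Int) ((l.take k.toNat).count 'P' : Int))
            ((l.take k.toNat).count 'S' : Int)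
        + pvW (l.drop k.toNat) k := by
  have hk0 : (0:Int) < k := by omega
  have hn : 1 ≤ l.length := List.length_pos_of_ne_nil hl
  set n := l.length with hnn
  set k' := k.toNat with hk'
  have hkk : (k' : Int) = k := Int.toNat_of_nonneg (by omega)
  have h1 : ((n:Int) + k - 1) / k = ((n:Int) - 1) / k + 1 := by
    rw [show (n:Int) + k - 1 = ((n:Int) - 1) + 1 * k by ring,
        Int.add_mul_ediv_right _ _ (by omega)]
  have h2 : (((n - k' : Nat):Int) + k - 1) / k = ((n:Int) - 1) / k := by
    rcases le_total n k' with h | h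
    · have hz : (n - k' : Nat) = 0 := by omega
      rw [hz]
      push_cast
      rw [show (0:Int) + k - 1 = k - 1 by ring, Int.ediv_eq_zero_of_lt (by omega) (by omega)]
      have : (n:Int) - 1 < k := by omega
      rw [Int.ediv_eq_zero_of_lt (by omega) this]
    · have : ((n - k' : Nat) : Int) = (n:Int) - k := by
        omega
      rw [this]
      congr 1; ring
  have hC : (((n:Int) + k - 1) / k).toNat
      = ((((n - k' : Nat):Int) + k - 1) / k).toNat + 1 := by
    rw [h1, h2]
    have : (0:Int) ≤ ((n:Int) - 1) / k := Int.ediv_nonneg (by omega) (by omega)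
    omega
  unfold pvW
  rw [← hnn, hC, List.range_succ_eq_map, List.map_cons, List.sum_cons, List.map_map]
  have hd : (l.drop k').length = n - k' := by rw [List.length_drop]
  rw [hd]
  congr 1
  · -- head term = max of counts of the first block
    have e0 : (k * ((0:Nat):Int)).toNat = 0 := by
      rw [show k * ((0:Nat):Int) = 0 by push_cast; ring]; rfl
    have e1 : (k * (((0:Nat):Int) + 1)).toNat = k' := by
      rw [show k * (((0:Nat):Int) + 1) = k by push_cast; ring]
    simp only [e0, e1]
    rw [show min 0 n = 0 by omega, List.take_zero, pv_take_min l k']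
    simp [pvCnt]
  · -- tail terms shift to the dropped list
    congr 1
    apply List.map_congr_left
    intro j hj
    simp only [Function.comp]
    have em1 : (k * (((j:Int)) + 1)).toNat = k' + k' * j := by
      have : k * ((j:Int) + 1) = ((k' + k' * j : Nat) : Int) := by
        push_cast [hkk]; ring
      rw [this, Int.toNat_natCast]
    have em2 : (k * ((((j:Nat) + 1 : Nat):Int) + 1)).toNat = k' + k' * (j + 1) := by
      have : k * (((j:Nat) + 1 : Nat):Int) + k = ((k' + k' * (j+1) : Nat) : Int) := by
        push_cast [hkk]; ring
      rw [show k * ((((j:Nat) + 1 : Nat):Int) + 1) = k * (((j:Nat) + 1 : Nat):Int) + k by ring,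
          this, Int.toNat_natCast]
    have em3 : (k * (((j:Nat) + 1 : Nat):Int)).toNat = k' + k' * j := by
      have : k * (((j:Nat) + 1 : Nat):Int) = ((k' + k' * j : Nat) : Int) := by
        push_cast [hkk]; ring
      rw [this, Int.toNat_natCast]
    have emj : (k * (j:Int)).toNat = k' * j := pv_toNat_mul k (by omega) j
    simp only [pvCnt, em2, em3, emj]
    rw [pv_count_shift l k' (k' * (j+1)) 'R', pv_count_shift l k' (k' * j) 'R',
        pv_count_shift l k' (k' * (j+1)) 'P', pv_count_shift l k' (k' * j) 'P',
        pv_count_shift l k' (k' * (j+1)) 'S', pv_count_shift l k' (k' * j) 'S']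
    have emd1 : (k * ((j:Int) + 1)).toNat = k' * (j + 1) := by
      have : k * ((j:Int) + 1) = ((k' * (j+1) : Nat) : Int) := by
        push_cast [hkk]; ring
      rw [this, Int.toNat_natCast]
    rw [emd1]
    ring_nf
    rfl

theorem pv_while_eq (k : Int) (hk : 2 ≤ k) :
    ∀ (n : Nat) (l : List Char), l.length = n → ∀ (w : Int),
      pvWhileWins (k.toNat - 1) w l = w + pvW l k := by
  intro n
  induction n using Nat.strong_induction_on with
  | _ n ih =>
    intro l hl w
    rw [pvWhileWins]
    by_cases h : l = []
    · rw [if_pos h, h, pv_pvW_nil k hk]; ring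
    · rw [if_neg h]
      have hk1 : k.toNat - 1 + 1 = k.toNat := by omega
      have hlen : (l.drop (k.toNat - 1 + 1)).length < n := by
        rw [List.length_drop]
        have : l.length ≠ 0 := fun h0 => h (List.eq_nil_of_length_eq_zero h0)
        omega
      rw [ih _ hlen _ rfl]
      rw [hk1] at *
      rw [pv_pvW_step l k hk h]
      ring

-- ===== VERDICT (by name: the statement is the Claim_ definition above) =====
theorem find_best_k_spec : Claim_equal_find_best_k := by
  intro s _
  unfold Spec_find_best_k find_best_k find_best_k_alt
  simp only []
  have htrip :
      (s.toList.zipIdx.foldl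
        (fun (st : List Int × List Int × List Int) (ci : Char × Nat) =>
          (st.1.set (ci.2 + 1) (st.1.getD ci.2 0 + if ci.1 = 'R' then 1 else 0),
           st.2.1.set (ci.2 + 1) (st.2.1.getD ci.2 0 + if ci.1 = 'P' then 1 else 0),
           st.2.2.set (ci.2 + 1) (st.2.2.getD ci.2 0 + if ci.1 = 'S' then 1 else 0)))
        (List.replicate (s.toList.length + 1) (0 : Int),
         List.replicate (s.toList.length + 1) (0 : Int),
         List.replicate (s.toList.length + 1) (0 : Int)))
      = ((List.range (s.toList.length + 1)).map (fun j => ((s.toList.take j).count 'R' : Int)),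
         (List.range (s.toList.length + 1)).map (fun j => ((s.toList.take j).count 'P' : Int)),
         (List.range (s.toList.length + 1)).map (fun j => ((s.toList.take j).count 'S' : Int))) := by
    rw [PySem.List.foldl_prod_mk
        (f := fun (pr : List Int) (ci : Char × Nat) =>
          pr.set (ci.2 + 1) (pr.getD ci.2 0 + if ci.1 = 'R' then 1 else 0))
        (g := fun (st : List Int × List Int) (ci : Char × Nat) =>
          (st.1.set (ci.2 + 1) (st.1.getD ci.2 0 + if ci.1 = 'P' then 1 else 0),
           st.2.set (ci.2 + 1) (st.2.getD ci.2 0 + if ci.1 = 'S' then 1 else 0)))]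
    rw [PySem.List.foldl_prod_mk
        (f := fun (pr : List Int) (ci : Char × Nat) =>
          pr.set (ci.2 + 1) (pr.getD ci.2 0 + if ci.1 = 'P' then 1 else 0))
        (g := fun (pr : List Int) (ci : Char × Nat) =>
          pr.set (ci.2 + 1) (pr.getD ci.2 0 + if ci.1 = 'S' then 1 else 0))]
    rw [pv_prefA 'R' s.toList, pv_prefA 'P' s.toList, pv_prefA 'S' s.toList]
  have h1 := congrArg Prod.fst htrip
  have h2 := congrArg (fun t => t.2.1) htrip
  have h3 := congrArg (fun t => t.2.2) htrip
  simp only [] at h1 h2 h3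
  rw [h1, h2, h3]
  congr 1
  apply PySem.List.foldl_congr_mem
  intro acc k hkmem
  have hk2 : 2 ≤ k := (PySem.List.mem_pyRange_one.mp hkmem).1
  rw [pv_winsA s.toList k hk2 _ _ _ rfl rfl rfl]
  rw [pv_while_eq k hk2 s.toList.length s.toList rfl 0, zero_add]
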